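-- pv_equiv track=rewrite | github.com/RayyanSidz/COM4402-master | Week 4/Session4/group_marks.py | group_marks
-- ===== SOURCE A (Python) =====
-- def group_marks(marks):
--     """
--     Group marks into 'Fail', 'Pass', and 'Distinction'.
--     marks: list of integers (0..100)
--     Returns a dict:
--     {
--     "Fail": [...],
--     "Pass": [...],
--     "Distinction": [...]
--     }
--     Raise TypeError if marks is not a list or if any element is not int.
--     Raise ValueError if any mark is outside 0..100.
--     """
--
--     if type(marks) != list:
--         raise TypeError("Invalid Datatype")
--     failList = []
--     passList = []
--     distinctionList = []
--     for mark in marks: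
--         if type(mark) != int:
--             raise TypeError("Invalid Datatype")
--         if mark < 0 or mark > 100:
--             raise ValueError("Out of range")
--         if mark < 40:
--             failList.append(mark)
--         elif 40 <= mark < 70:
--             passList.append(mark)
--         else:
--             distinctionList.append(mark)
--
--     return {
--         "Fail" : failList,
--         "Pass" : passList,
--         "Distinction" : distinctionList
--     }
-- ===== SOURCE B (Python) =====
-- def group_marks(marks):
--     if type(marks) != list:
--         raise TypeError("Invalid Datatype")
--     # dedicated validation pass, first offender in iteration order
--     for mark in marks:
--         if type(mark) != int:
--             raise TypeError("Invalid Datatype")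
--         if mark < 0 or mark > 100:
--             raise ValueError("Out of range")
--     return {
--         "Fail": [m for m in marks if m < 40],
--         "Pass": [m for m in marks if 40 <= m < 70],
--         "Distinction": [m for m in marks if m >= 70],
--     }
-- ===== Notes on version B (the rewrite author's own statement) =====
-- stated objective: simpler
-- what changed: B separates a dedicated validation pass from the bucketing, then builds each of the three lists independently with a comprehension instead of A's single loop maintaining three accumulators.
import Mathlib
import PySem

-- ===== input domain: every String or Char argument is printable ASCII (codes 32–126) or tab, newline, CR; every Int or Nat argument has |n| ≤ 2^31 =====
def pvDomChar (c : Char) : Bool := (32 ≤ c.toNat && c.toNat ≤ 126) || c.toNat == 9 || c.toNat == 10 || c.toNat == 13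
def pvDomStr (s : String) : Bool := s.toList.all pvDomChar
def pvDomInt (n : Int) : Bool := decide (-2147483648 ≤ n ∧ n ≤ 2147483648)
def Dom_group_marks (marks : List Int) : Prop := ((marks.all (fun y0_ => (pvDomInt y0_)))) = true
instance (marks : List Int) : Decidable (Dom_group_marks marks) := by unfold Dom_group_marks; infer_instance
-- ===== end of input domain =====

-- B separates a validation pass from bucketing and builds the three lists independently (same results; return-value equivalence, exceptions excluded by Pre_).
-- ===== PORT A =====
-- single loop maintaining three accumulators (the range check raises in Python; those inputs are outside Pre_)
def group_marksLoop (marks : List Int) (failList passList distinctionList : List Int) : List Int × List Int × List Int :=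
  match marks with
  | [] => (failList, passList, distinctionList)
  | mark :: rest =>
    if mark < 40 then group_marksLoop rest (failList ++ [mark]) passList distinctionList
    else if 40 ≤ mark ∧ mark < 70 then group_marksLoop rest failList (passList ++ [mark]) distinctionList
    else group_marksLoop rest failList passList (distinctionList ++ [mark])

def group_marks (marks : List Int) : List (String × List Int) :=
  let r := group_marksLoop marks [] [] []
  [("Fail", r.1), ("Pass", r.2.1), ("Distinction", r.2.2)]

-- ===== PORT B =====
def group_marks_alt (marks : List Int) : List (String × List Int) :=
  [("Fail", marks.filter (fun m => m < 40)),
   ("Pass", marks.filter (fun m => 40 ≤ m ∧ m < 70)),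
   ("Distinction", marks.filter (fun m => 70 ≤ m))]

-- ===== PRECONDITION & SPEC =====
-- Pre_ excludes inputs with a mark outside 0..100, on which Python A (and B) raise ValueError.
def Pre_group_marks (marks : List Int) : Prop := ∀ m ∈ marks, 0 ≤ m ∧ m ≤ 100
instance (marks : List Int) : Decidable (Pre_group_marks marks) := by unfold Pre_group_marks; infer_instance
def pvWitness_group_marks : List Int := [10, 55, 95, 0, 100, 40, 70, 69]
def Spec_group_marks (marks : List Int) (out : List (String × List Int)) : Prop := out = group_marks_alt marks
instance (marks : List Int) (out : List (String × List Int)) : Decidable (Spec_group_marks marks out) := by unfold Spec_group_marks; infer_instance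

-- ===== CLAIM (what is proved, stated in full; the proofs are below) =====
def Claim_equal_group_marks : Prop := ∀ (marks : List Int), Dom_group_marks marks → Pre_group_marks marks → Spec_group_marks marks (group_marks marks)

-- ===== LEMMAS AND PROOFS =====

theorem group_marksLoop_eq (marks f p d : List Int) :
    group_marksLoop marks f p d =
      (f ++ marks.filter (fun m => m < 40),
       p ++ marks.filter (fun m => 40 ≤ m ∧ m < 70),
       d ++ marks.filter (fun m => 70 ≤ m)) := by
  induction marks generalizing f p d with
  | nil => simp [group_marksLoop]
  | cons m rest ih =>
    simp only [group_marksLoop, List.filter_cons]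
    by_cases h1 : m < 40
    · simp only [ih, if_pos h1]
      simp [decide_eq_true_eq] <;> omega
    · by_cases h2 : m < 70
      · simp only [ih, if_neg h1, if_pos (show 40 ≤ m ∧ m < 70 by omega)]
        simp [decide_eq_true_eq] <;> omega
      · simp only [ih, if_neg h1, if_neg (show ¬(40 ≤ m ∧ m < 70) by omega)]
        simp [decide_eq_true_eq] <;> omega

-- ===== VERDICT (by name: the statement is the Claim_ definition above) =====
theorem group_marks_spec : Claim_equal_group_marks := by
  intro marks _ _
  unfold Spec_group_marks group_marks group_marks_alt
  simp [group_marksLoop_eq]
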